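-- pv_equiv track=rewrite | github.com/nephashi/abc | transform/silh_pose_estimate.py | __get_border_corrdinate
-- ===== SOURCE A (Python) =====
-- def __get_border_corrdinate(row):
--     '''
--
--     :param row:
--     :return:
--     '''
--     left = -1
--     right = -1
--     for i in range(0, len(row)):
--         if (row[i] == 255):
--             left = i
--             break
--     for i in range(len(row) - 1, -1, -1):
--         if (row[i] == 255):
--             right = i
--             break
--
--     return left, right
-- ===== SOURCE B (Python) =====
-- def __get_border_corrdinate(row):
--     left = -1
--     right = -1
--     for i, v in enumerate(row):
--         if v == 255:
--             if left == -1: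
--                 left = i
--             right = i
--     return left, right
-- ===== Notes on version B (the rewrite author's own statement) =====
-- stated objective: alternative
-- what changed: Replaces A's two opposite-direction early-breaking index scans with a single forward pass over enumerate(row) that records the first and last-seen index of 255.
import Mathlib
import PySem

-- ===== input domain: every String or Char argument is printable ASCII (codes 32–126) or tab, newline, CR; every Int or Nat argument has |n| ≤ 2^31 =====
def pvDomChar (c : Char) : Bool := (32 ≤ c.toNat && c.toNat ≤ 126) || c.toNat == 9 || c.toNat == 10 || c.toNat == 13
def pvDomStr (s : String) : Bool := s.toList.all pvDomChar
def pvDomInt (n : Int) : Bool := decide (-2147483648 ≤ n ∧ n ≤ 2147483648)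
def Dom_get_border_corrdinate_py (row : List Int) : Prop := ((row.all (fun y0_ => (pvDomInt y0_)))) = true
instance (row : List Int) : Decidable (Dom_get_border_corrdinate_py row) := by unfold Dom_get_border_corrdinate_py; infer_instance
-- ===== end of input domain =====

-- B replaces A's two opposite-direction early-breaking index scans by one forward pass
-- over enumerate(row) maintaining the first- and last-seen index of 255 (objective: alternative).

-- ===== PORT A =====
-- first loop of A: for i in range(0, len(row)): if row[i] == 255: left = i; break
def pvALeft (row : List Int) (i : Nat) : Int :=
  if _h : i < row.length then
    if PySem.List.pyGet? row (i : Int) = some 255 then (i : Int) else pvALeft row (i + 1)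
  else -1
termination_by row.length - i

-- second loop of A: for i in range(len(row) - 1, -1, -1): if row[i] == 255: right = i; break
-- (fuel = number of remaining indices; call with row.length, so i runs len-1, …, 0)
def pvARight (row : List Int) : Nat → Int
  | 0 => -1
  | i + 1 => if PySem.List.pyGet? row (i : Int) = some 255 then (i : Int) else pvARight row i

def get_border_corrdinate_py (row : List Int) : Int × Int :=
  (pvALeft row 0, pvARight row row.length)

-- ===== PORT B =====
def get_border_corrdinate_py_alt (row : List Int) : Int × Int :=
  (PySem.List.enumerate row 0).foldl
    (fun lr p =>
      if p.2 = 255 then ((if lr.1 = -1 then p.1 else lr.1), p.1) else lr)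
    (-1, -1)

-- ===== PRECONDITION & SPEC =====
def Spec_get_border_corrdinate_py (row : List Int) (out : Int × Int) : Prop := out = get_border_corrdinate_py_alt row
instance (row : List Int) (out : Int × Int) : Decidable (Spec_get_border_corrdinate_py row out) := by unfold Spec_get_border_corrdinate_py; infer_instance

-- ===== CLAIM (what is proved, stated in full; the proofs are below) =====
def Claim_equal_get_border_corrdinate_py : Prop := ∀ (row : List Int), Dom_get_border_corrdinate_py row → Spec_get_border_corrdinate_py row (get_border_corrdinate_py row)

-- ===== LEMMAS AND PROOFS =====

-- structural version of A's first loop, used only in the proofs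
def pvFirstAux : List Int → Int → Int
  | [], _ => -1
  | x :: xs, k => if x = 255 then k else pvFirstAux xs (k + 1)

theorem pvALeft_eq_firstAux (row : List Int) : ∀ i : Nat, pvALeft row i = pvFirstAux (row.drop i) (i : Int) := by
  intro i
  fun_induction pvALeft row i with
  | case1 i h hhit =>
      rw [List.drop_eq_getElem_cons h]
      simp only [PySem.List.pyGet?_natCast, List.getElem?_eq_getElem h, Option.some.injEq] at hhit
      simp [pvFirstAux, hhit]
  | case2 i h hmiss ih =>
      rw [List.drop_eq_getElem_cons h]
      simp only [PySem.List.pyGet?_natCast, List.getElem?_eq_getElem h, Option.some.injEq] at hmiss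
      simp [pvFirstAux, hmiss, ih]
  | case3 i h =>
      have : row.length ≤ i := by omega
      simp [List.drop_eq_nil_of_le this, pvFirstAux]

theorem pvFirstAux_append (x : Int) : ∀ (xs : List Int) (k : Int), 0 ≤ k →
    pvFirstAux (xs ++ [x]) k =
      if pvFirstAux xs k = -1 then (if x = 255 then k + xs.length else -1) else pvFirstAux xs k := by
  intro xs
  induction xs with
  | nil => intro k hk; simp [pvFirstAux]
  | cons y ys ih =>
      intro k hk
      by_cases hy : y = 255
      · have : k ≠ -1 := by omega
        simp [pvFirstAux, hy, this]
      · have h1 : (0:Int) ≤ k + 1 := by omega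
        simp only [List.cons_append, pvFirstAux, hy, if_false, ih (k+1) h1]
        split_ifs <;> first | rfl | (simp only [List.length_cons]; push_cast; ring)

theorem pvARight_append (xs : List Int) (x : Int) :
    ∀ i : Nat, i ≤ xs.length → pvARight (xs ++ [x]) i = pvARight xs i := by
  intro i
  induction i with
  | zero => intro _; rfl
  | succ j ih =>
      intro h
      have hj : j < xs.length := by omega
      have : PySem.List.pyGet? (xs ++ [x]) (j : Int) = PySem.List.pyGet? xs (j : Int) := by
        simp [PySem.List.pyGet?_natCast, List.getElem?_append_left hj]
      simp [pvARight, this, ih (by omega)]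

theorem pvARight_last (xs : List Int) (x : Int) :
    pvARight (xs ++ [x]) (xs.length + 1) =
      if x = 255 then (xs.length : Int) else pvARight xs xs.length := by
  simp [pvARight, pvARight_append xs x xs.length (le_refl _)]

theorem pv_key (row : List Int) : get_border_corrdinate_py row = get_border_corrdinate_py_alt row := by
  induction row using List.reverseRecOn with
  | nil => simp [get_border_corrdinate_py, get_border_corrdinate_py_alt, pvALeft, pvARight]
  | append_singleton xs x ih =>
      unfold get_border_corrdinate_py at ih ⊢
      unfold get_border_corrdinate_py_alt at ih ⊢
      rw [PySem.List.enumerate_append, PySem.List.enumerate_cons, PySem.List.enumerate_nil,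
        List.foldl_append, ← ih]
      have hL : pvALeft (xs ++ [x]) 0 =
          if pvALeft xs 0 = -1 then (if x = 255 then ((xs.length : Int)) else -1) else pvALeft xs 0 := by
        rw [pvALeft_eq_firstAux (xs ++ [x]) 0, pvALeft_eq_firstAux xs 0]
        simpa using pvFirstAux_append x xs 0 (le_refl 0)
      have hR : pvARight (xs ++ [x]) (xs ++ [x]).length =
          if x = 255 then (xs.length : Int) else pvARight xs xs.length := by
        rw [List.length_append]; simpa using pvARight_last xs x
      rw [hL, hR]
      simp only [List.foldl_cons, List.foldl_nil]
      split_ifs <;> simp_all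

-- ===== VERDICT (by name: the statement is the Claim_ definition above) =====
theorem get_border_corrdinate_py_spec : Claim_equal_get_border_corrdinate_py := by
  intro row _
  unfold Spec_get_border_corrdinate_py
  exact pv_key row
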